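-- pv_equiv track=rewrite | github.com/lsmman/All-about-Algorithms | python-SWExpert/1206_sw아카데미_view.py | solution
-- ===== SOURCE A (Python) =====
-- def solution(arr, n):
--     maxs = [0] * n
--     view = [0] * n
--     for i in range(n - 1):
--         maxs[i] = max(arr[i], arr[i + 1])
--     for i in range(2, n - 2):
--         view[i] = max(0, arr[i] - max(maxs[i - 2], maxs[i + 1]))
--     return sum(view)
-- ===== SOURCE B (Python) =====
-- def solution(arr, n):
--     total = 0
--     w = []
--     for x in arr[:max(0, n)]:
--         w = w + [x]
--         if len(w) == 5:
--             total += max(0, w[2] - max(w[0], w[1], w[3], w[4]))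
--             w = w[1:]
--     return total
-- ===== Notes on version B (the rewrite author's own statement) =====
-- stated objective: alternative
-- what changed: B streams over the value prefix arr[:max(0,n)] carrying a rolling 5-element window buffer, emitting a contribution each time the buffer fills and sliding it, instead of A's staged index-driven passes that precompute a pairwise-max table and a per-index view array and sum it.
import Mathlib
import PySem

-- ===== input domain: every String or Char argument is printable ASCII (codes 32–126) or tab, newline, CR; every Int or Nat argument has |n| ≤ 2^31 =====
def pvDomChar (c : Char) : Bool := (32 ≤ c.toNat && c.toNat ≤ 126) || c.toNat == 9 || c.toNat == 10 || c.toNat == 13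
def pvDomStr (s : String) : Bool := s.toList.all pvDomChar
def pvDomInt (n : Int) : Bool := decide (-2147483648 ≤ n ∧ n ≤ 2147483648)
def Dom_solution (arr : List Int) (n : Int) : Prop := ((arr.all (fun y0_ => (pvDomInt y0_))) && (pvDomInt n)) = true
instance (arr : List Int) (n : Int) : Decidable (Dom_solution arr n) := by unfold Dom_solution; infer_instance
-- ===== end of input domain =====

-- B replaces A's staged index-driven passes (pairwise-max table + view array + sum) with a
-- single streaming fold over the value prefix carrying a rolling 5-element window buffer
-- (objective: alternative, same O(n) cost).

-- ===== PORT A =====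
def solution (arr : List Int) (n : Int) : Int :=
  let maxs0 : List Int := List.replicate n.toNat 0
  let view0 : List Int := List.replicate n.toNat 0
  let maxs :=
    (PySem.List.pyRange 0 (n - 1) 1).foldl
      (fun m i =>
        PySem.List.pySetD m i (max (PySem.List.pyGetD arr i 0) (PySem.List.pyGetD arr (i + 1) 0)))
      maxs0
  let view :=
    (PySem.List.pyRange 2 (n - 2) 1).foldl
      (fun v i =>
        PySem.List.pySetD v i
          (max 0 (PySem.List.pyGetD arr i 0 -
            max (PySem.List.pyGetD maxs (i - 2) 0) (PySem.List.pyGetD maxs (i + 1) 0))))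
      view0
  view.sum

-- ===== PORT B =====
-- one streamed step: append x to the window buffer; if it reached 5, emit the window's
-- contribution and slide the buffer
def pvStep (st : List Int × Int) (x : Int) : List Int × Int :=
  let w := st.1 ++ [x]
  if w.length == 5 then
    (PySem.List.slice w (some 1) none,
     st.2 + max 0 (PySem.List.pyGetD w 2 0 -
       max (max (max (PySem.List.pyGetD w 0 0) (PySem.List.pyGetD w 1 0))
             (PySem.List.pyGetD w 3 0))
         (PySem.List.pyGetD w 4 0)))
  else (w, st.2)

def solution_alt (arr : List Int) (n : Int) : Int :=
  ((PySem.List.slice arr none (some (max 0 n))).foldl pvStep ([], 0)).2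

-- ===== PRECONDITION & SPEC =====
-- A's first loop reads arr[i+1] for i up to n-2, so A raises IndexError exactly when
-- n ≥ 2 and len(arr) < n; those inputs are excluded (A returns on everything else).
def Pre_solution (arr : List Int) (n : Int) : Prop := n ≤ 1 ∨ n ≤ (arr.length : Int)
instance (arr : List Int) (n : Int) : Decidable (Pre_solution arr n) := by
  unfold Pre_solution; infer_instance

def pvWitness_solution : List Int × Int := ([3, 1, 7, 2, 5, 4], 6)

def Spec_solution (arr : List Int) (n : Int) (out : Int) : Prop := out = solution_alt arr n
instance (arr : List Int) (n : Int) (out : Int) : Decidable (Spec_solution arr n out) := by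
  unfold Spec_solution; infer_instance

-- ===== CLAIM (what is proved, stated in full; the proofs are below) =====
def Claim_equal_solution : Prop :=
  ∀ (arr : List Int) (n : Int), Dom_solution arr n → Pre_solution arr n →
    Spec_solution arr n (solution arr n)

-- ===== LEMMAS AND PROOFS =====

-- the common indexed form both ports are reduced to: the 4-neighbor view sum over xs
def pvG (xs : List Int) : Int :=
  ((PySem.List.pyRange 2 ((xs.length : Int) - 2) 1).map
    (fun i => max 0 (PySem.List.pyGetD xs i 0 -
      max (max (max (PySem.List.pyGetD xs (i - 2) 0) (PySem.List.pyGetD xs (i - 1) 0))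
            (PySem.List.pyGetD xs (i + 1) 0))
        (PySem.List.pyGetD xs (i + 2) 0)))).sum

-- sum after writing `a` at an index currently holding 0 just adds `a`
lemma sum_set_of_zero (l : List Int) (k : Nat) (a : Int) (hk : k < l.length) (h0 : l[k] = 0) :
    (l.set k a).sum = l.sum + a := by
  have h1 := List.sum_set l k a
  have h2 := List.sum_set l k (l[k])
  rw [List.set_getElem_self] at h2
  rw [if_pos hk] at h1 h2
  omega

-- value at index j after a fold of writes at indices a, a+1, …, b-1
lemma getD_foldl_pySetD (g : Int → Int) (a b : Int) (m : List Int) (j : Nat)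
    (ha : 0 ≤ a) (hb : b ≤ (m.length : Int)) (hj : j < m.length) :
    PySem.List.pyGetD
      ((PySem.List.pyRange a b 1).foldl (fun m i => PySem.List.pySetD m i (g i)) m) (j : Int) 0
    = if a ≤ (j : Int) ∧ (j : Int) < b then g j else PySem.List.pyGetD m (j : Int) 0 := by
  by_cases hab : a < b
  · have hdec : (b - (a + 1)).toNat < (b - a).toNat := by omega
    rw [PySem.List.pyRange_one_cons hab, List.foldl_cons]
    have ha' : a = ((a.toNat : Int)) := by omega
    have hlen : (PySem.List.pySetD m a (g a)).length = m.length := PySem.List.length_pySetD m a (g a)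
    have ih := getD_foldl_pySetD g (a + 1) b (PySem.List.pySetD m a (g a)) j (by omega)
      (by rw [hlen]; exact hb) (by rw [hlen]; exact hj)
    have hset := PySem.List.pyGetD_pySetD_natCast m a.toNat j (g a) 0 (by omega)
    rw [← ha'] at hset
    rw [ih, hset]
    by_cases hja : j = a.toNat
    · subst hja
      rw [if_pos rfl, if_neg (by omega), if_pos (by omega)]; exact congrArg g ha'
    · rw [if_neg hja]
      by_cases h1 : a + 1 ≤ (j : Int) ∧ (j : Int) < b
      · rw [if_pos h1, if_pos (by omega)]
      · rw [if_neg h1, if_neg (by omega)]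
  · rw [PySem.List.pyRange_one_eq_nil (by omega)]
    simp only [List.foldl_nil]
    rw [if_neg (by omega)]
termination_by (b - a).toNat

-- sum after a fold of writes at indices a…b-1 into positions currently holding 0
lemma sum_foldl_pySetD (g : Int → Int) (a b : Int) (m : List Int)
    (ha : 0 ≤ a) (hb : b ≤ (m.length : Int))
    (hz : ∀ j : Nat, a ≤ (j : Int) → (j : Int) < b → m.getD j 0 = 0) :
    ((PySem.List.pyRange a b 1).foldl (fun m i => PySem.List.pySetD m i (g i)) m).sum
    = m.sum + ((PySem.List.pyRange a b 1).map g).sum := by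
  by_cases hab : a < b
  · have hdec : (b - (a + 1)).toNat < (b - a).toNat := by omega
    rw [PySem.List.pyRange_one_cons hab, List.foldl_cons, List.map_cons, List.sum_cons]
    have hm' : PySem.List.pySetD m a (g a) = m.set a.toNat (g a) :=
      PySem.List.pySetD_of_nonneg m (g a) ha
    have hlen : (PySem.List.pySetD m a (g a)).length = m.length := PySem.List.length_pySetD m a (g a)
    have hz' : ∀ j : Nat, a + 1 ≤ (j : Int) → (j : Int) < b →
        (PySem.List.pySetD m a (g a)).getD j 0 = 0 := by
      intro j h1 h2
      rw [hm']
      have hjl : j < m.length := by omega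
      rw [List.getD_eq_getElem _ _ (by simpa using hjl), List.getElem_set_ne (by omega)]
      have := hz j (by omega) h2
      rwa [List.getD_eq_getElem _ _ hjl] at this
    have ih := sum_foldl_pySetD g (a + 1) b (PySem.List.pySetD m a (g a)) (by omega)
      (by rw [hlen]; exact hb) hz'
    rw [ih]
    have h0 : m[a.toNat]'(by omega) = 0 := by
      have := hz a.toNat (by omega) (by omega)
      rwa [List.getD_eq_getElem _ _ (by omega)] at this
    have hsum : (PySem.List.pySetD m a (g a)).sum = m.sum + g a := by
      rw [hm']; exact sum_set_of_zero m a.toNat (g a) (by omega) h0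
    rw [hsum]; ring
  · rw [PySem.List.pyRange_one_eq_nil (by omega)]; simp
termination_by (b - a).toNat

-- A's maxs table holds the pairwise neighbor max at every index of its first loop's range
lemma maxs_getD (arr : List Int) (n : Int) (j : Int) (h0 : 0 ≤ j) (h1 : j < n - 1) :
    PySem.List.pyGetD
      ((PySem.List.pyRange 0 (n - 1) 1).foldl
        (fun m i =>
          PySem.List.pySetD m i (max (PySem.List.pyGetD arr i 0) (PySem.List.pyGetD arr (i + 1) 0)))
        (List.replicate n.toNat 0)) j 0
    = max (PySem.List.pyGetD arr j 0) (PySem.List.pyGetD arr (j + 1) 0) := by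
  have hj : j = ((j.toNat : Int)) := by omega
  rw [hj, getD_foldl_pySetD _ 0 (n - 1) _ j.toNat (le_refl 0)
    (by simp only [List.length_replicate]; omega) (by simp only [List.length_replicate]; omega)]
  rw [if_pos ⟨by omega, by omega⟩]

-- A equals the common indexed form over arr with bound n
lemma solution_eq_indexed (arr : List Int) (n : Int) (hn : 0 ≤ n)
    (_hlen : n ≤ (arr.length : Int)) :
    solution arr n
    = ((PySem.List.pyRange 2 (n - 2) 1).map
        (fun i => max 0 (PySem.List.pyGetD arr i 0 -
          max (max (max (PySem.List.pyGetD arr (i - 2) 0) (PySem.List.pyGetD arr (i - 1) 0))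
                (PySem.List.pyGetD arr (i + 1) 0))
            (PySem.List.pyGetD arr (i + 2) 0)))).sum := by
  by_cases hn4 : n ≤ 4
  · have hr : PySem.List.pyRange 2 (n - 2) 1 = [] :=
      PySem.List.pyRange_one_eq_nil (by omega)
    simp [solution, hr]
  · unfold solution
    rw [sum_foldl_pySetD _ 2 (n - 2) _ (by omega)
      (by simp only [List.length_replicate]; omega) (by intro j _ _; simp)]
    simp only [List.sum_replicate, smul_zero, zero_add]
    apply congrArg
    apply List.map_congr_left
    intro i hi
    rw [PySem.List.mem_pyRange_one] at hi
    have e1 : i - 2 + 1 = i - 1 := by ring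
    have e2 : i + 1 + 1 = i + 2 := by ring
    rw [maxs_getD arr n (i - 2) (by omega) (by omega),
        maxs_getD arr n (i + 1) (by omega) (by omega), e1, e2]
    conv_lhs => rw [← max_assoc]

-- getD through an appended last element, index inside the prefix
lemma pyGetD_append_lt (ys : List Int) (x : Int) (i : Int) (h0 : 0 ≤ i)
    (h1 : i < (ys.length : Int)) :
    PySem.List.pyGetD (ys ++ [x]) i 0 = PySem.List.pyGetD ys i 0 := by
  rw [PySem.List.pyGetD_eq_getElem _ 0 h0 (by simp; omega),
      PySem.List.pyGetD_eq_getElem _ 0 h0 (by omega)]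
  exact List.getElem_append_left (by omega)

-- getD through a take, index inside the taken prefix
lemma pyGetD_take (arr : List Int) (m : Nat) (i : Int) (h0 : 0 ≤ i) (h1 : i < (m : Int))
    (hm : m ≤ arr.length) :
    PySem.List.pyGetD (arr.take m) i 0 = PySem.List.pyGetD arr i 0 := by
  rw [PySem.List.pyGetD_eq_getElem _ 0 h0 (by simp; omega),
      PySem.List.pyGetD_eq_getElem _ 0 h0 (by omega)]
  exact List.getElem_take

-- the streaming fold invariant: buffer = last ≤4 elements, accumulator = pvG of the seen prefix
lemma stream_invariant (ys : List Int) :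
    ys.foldl pvStep ([], 0) = (ys.drop (ys.length - 4), pvG ys) := by
  induction ys using List.reverseRecOn with
  | nil => simp [pvG, PySem.List.pyRange_one_eq_nil (by omega : (-2 : Int) ≤ 2)]
  | append_singleton ys x ih =>
    rw [List.foldl_append, List.foldl_cons, List.foldl_nil, ih]
    by_cases h4 : ys.length ≤ 3
    · have hlen : (ys.drop (ys.length - 4) ++ [x]).length ≠ 5 := by
        simp [List.length_drop]; omega
      unfold pvStep
      simp only [beq_iff_eq, if_neg hlen]
      have hd : ys.length - 4 = 0 := by omega
      have hd' : (ys ++ [x]).length - 4 = 0 := by simp; omega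
      rw [hd, hd', List.drop_zero, List.drop_zero]
      have hg : pvG (ys ++ [x]) = pvG ys := by
        unfold pvG
        have h1 : PySem.List.pyRange 2 (((ys ++ [x]).length : Int) - 2) 1 = [] :=
          PySem.List.pyRange_one_eq_nil (by simp; omega)
        have h2 : PySem.List.pyRange 2 ((ys.length : Int) - 2) 1 = [] :=
          PySem.List.pyRange_one_eq_nil (by omega)
        rw [h1, h2]
        rfl
      rw [hg]
    · -- ys has ≥ 4 elements: the window fills; name its last four a,b,c,d
      have hlen4 : (ys.drop (ys.length - 4)).length = 4 := by
        simp [List.length_drop]; omega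
      obtain ⟨a, b, c, d, habcd⟩ :
          ∃ a b c d, ys.drop (ys.length - 4) = [a, b, c, d] := by
        rcases hl : ys.drop (ys.length - 4) with _ | ⟨a, _ | ⟨b, _ | ⟨c, _ | ⟨d, _ | ⟨e, t⟩⟩⟩⟩⟩ <;>
          first
            | exact ⟨a, b, c, d, hl⟩
            | exact ⟨a, b, c, d, rfl⟩
            | (exfalso; rw [hl] at hlen4; simp at hlen4)
      unfold pvStep
      rw [habcd]
      simp only [List.cons_append, List.nil_append]
      rw [if_pos (by simp), Prod.mk.injEq]
      have hget : ∀ k : Nat, k < 4 → ys[ys.length - 4 + k]? = some ([a, b, c, d].getD k 0) := by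
        intro k hk
        have := congrArg (fun l => l[k]?) habcd
        simp only [List.getElem?_drop] at this
        rw [this]
        interval_cases k <;> simp
      constructor
      · -- buffer slides correctly
        rw [PySem.List.slice_from_one]
        have h1 : (ys ++ [x]).length - 4 = (ys.length - 4) + 1 := by simp; omega
        have hdr : List.drop (ys.length - 4) (ys ++ [x]) = [a, b, c, d, x] := by
          rw [List.drop_append_of_le_length (by omega), habcd]
          rfl
        rw [h1, ← List.drop_drop, hdr]
        rfl
      · -- accumulator gains exactly the new window's contribution
        unfold pvG
        have hsucc : ((ys ++ [x]).length : Int) - 2 = ((ys.length : Int) - 2) + 1 := by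
          simp; omega
        rw [hsucc, PySem.List.pyRange_one_succ_right (by omega), List.map_append,
          List.sum_append]
        congr 1
        · -- old windows unchanged by the append
          apply congrArg
          apply List.map_congr_left
          intro i hi
          rw [PySem.List.mem_pyRange_one] at hi
          rw [pyGetD_append_lt ys x i (by omega) (by omega),
              pyGetD_append_lt ys x (i - 2) (by omega) (by omega),
              pyGetD_append_lt ys x (i - 1) (by omega) (by omega),
              pyGetD_append_lt ys x (i + 1) (by omega) (by omega),
              pyGetD_append_lt ys x (i + 2) (by omega) (by omega)]
        · -- the new window at center len-2 is [a,b,c,d,x]'s contribution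
          simp only [List.map_cons, List.map_nil, List.sum_cons, List.sum_nil, add_zero]
          have gys : ∀ (j : Int) (k : Nat), k < 4 → j = (ys.length : Int) - 4 + k →
              PySem.List.pyGetD (ys ++ [x]) j 0 = [a, b, c, d].getD k 0 := by
            intro j k hk hj
            rw [pyGetD_append_lt ys x j (by omega) (by omega),
              PySem.List.pyGetD_eq_getElem _ 0 (by omega) (by omega)]
            have hjn : j.toNat = ys.length - 4 + k := by omega
            have h := hget k hk
            rw [List.getElem?_eq_getElem (by omega)] at h
            simp only [hjn]
            exact Option.some.inj h
          have gx : PySem.List.pyGetD (ys ++ [x]) ((ys.length : Int) - 2 + 2) 0 = x := by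
            have : (ys.length : Int) - 2 + 2 = (ys.length : Int) := by ring
            rw [this, PySem.List.pyGetD_eq_getElem _ 0 (by omega) (by simp)]
            simp
          rw [gys ((ys.length : Int) - 2) 2 (by omega) (by omega),
              gys ((ys.length : Int) - 2 - 2) 0 (by omega) (by omega),
              gys ((ys.length : Int) - 2 - 1) 1 (by omega) (by omega),
              gys ((ys.length : Int) - 2 + 1) 3 (by omega) (by omega), gx]
          simp [PySem.List.pyGetD]

-- ===== VERDICT (by name: the statement is the Claim_ definition above) =====
theorem solution_spec : Claim_equal_solution := by
  intro arr n _ hpre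
  unfold Pre_solution at hpre
  unfold Spec_solution solution_alt
  by_cases hn : n ≤ 0
  · -- empty prefix on B's side, empty loops on A's side
    have hmax : max 0 n = 0 := by omega
    rw [hmax, PySem.List.slice_to arr (by omega)]
    simp only [Int.toNat_zero, List.take_zero, List.foldl_nil]
    have hr : PySem.List.pyRange 2 (n - 2) 1 = [] :=
      PySem.List.pyRange_one_eq_nil (by omega)
    simp [solution, hr]
  · have hmax : max 0 n = n := by omega
    rw [hmax, PySem.List.slice_to arr (by omega), stream_invariant]
    by_cases hn1 : n ≤ 1
    · -- prefix of ≤1 element: both sides are 0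
      have hr : PySem.List.pyRange 2 (n - 2) 1 = [] :=
        PySem.List.pyRange_one_eq_nil (by omega)
      have hlen : ((arr.take n.toNat).length : Int) ≤ 1 := by
        simp [List.length_take]; omega
      have hg : pvG (arr.take n.toNat) = 0 := by
        unfold pvG
        rw [PySem.List.pyRange_one_eq_nil (by omega)]; simp
      simp [solution, hr, hg]
    · -- 2 ≤ n: Pre gives n ≤ len arr, so the prefix has length exactly n
      have hlen : n ≤ (arr.length : Int) := by omega
      have htk : ((arr.take n.toNat).length : Int) = n := by
        simp [List.length_take]; omega
      rw [solution_eq_indexed arr n (by omega) hlen]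
      unfold pvG
      rw [htk]
      apply congrArg
      apply List.map_congr_left
      intro i hi
      rw [PySem.List.mem_pyRange_one] at hi
      rw [pyGetD_take arr n.toNat i (by omega) (by omega) (by omega),
          pyGetD_take arr n.toNat (i - 2) (by omega) (by omega) (by omega),
          pyGetD_take arr n.toNat (i - 1) (by omega) (by omega) (by omega),
          pyGetD_take arr n.toNat (i + 1) (by omega) (by omega) (by omega),
          pyGetD_take arr n.toNat (i + 2) (by omega) (by omega) (by omega)]
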